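/-
  jsmn IS CORRECT ON VALID JSON: THE HEADLINE STATEMENTS, for the two compiled configurations and for the bytes `jsmn_main` writes.

  A JSON text is `w1 ++ l.text ++ w2`: a well-formed layout `l` (Json/Grammar.lean: a value with the whitespace of one rendering) between
  whitespace. `l.tokens w1.length 0 (-1)` are the expected tokens (Json/Jsmn/Expected.lean), `l.count` their number.

  run_default_valid          default build, token array `ts0` of `n ≥ l.count` entries: result `l.count`; tokens = expected, except that the
                             `parent` field (which does not exist in this build's C struct) keeps what `ts0` held; tail of `ts0` untouched
  run_strictLinks_valid      -DJSMN_STRICT -DJSMN_PARENT_LINKS: result `l.count`, tokens = expected (parents included), tail untouched —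
                             PROVIDED a top-level number / true / false / null is followed by at least one whitespace character
  run_strictLinks_bare_primitive   otherwise (`w2 = []`): JSMN_ERROR_PART (-3) — a valid JSON text that this build rejects
  run_count_valid            counting mode (tokens == NULL), any configuration: `l.count` (same proviso in strict mode)
  encodeResult_valid         what `jsmn_main` leaves in the output buffer: the count, then exactly the expected tokens' bytes (16 per token
                             without, 20 with parent links) — in every configuration, whatever `ts0` held
  parse_valid_summary        the statement without layouts: from `Prints v text`, the tokens have `Value.shape v` and every one `Spans` the text
  tokens_unique              the expected tokens depend on the text only (not on which of its layouts one takes)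

  WHERE THE CONFIGURATIONS DIFFER ON VALID JSON — everything else (the count, every token's type / start / end / size, the final parser
  state pos = len, toknext = count, toksuper = -1, the untouched tail of the array) is THE SAME in all four configurations:
   1. JSMN_STRICT returns JSMN_ERROR_PART (-3) for a JSON text that is a number / true / false / null with nothing behind it (`42`, ` true`):
      jsmn_parse_primitive wants to SEE a terminator (whitespace , ] }) in strict mode; at the end of the input it gives up. With trailing
      whitespace (`42 `) the text is accepted. In token mode and in counting mode alike. Nested primitives always have a terminator.
   2. JSMN_PARENT_LINKS stores in `parent` the index of the enclosing token (-1 at top level; the KEY for a member's value; the object for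
      a key); without it the field does not exist in C, and the model's `parent` keeps whatever the array held (`stampTok`).
   3. Inside the loop, `toksuper` behind a nested object / array: with parent links the closed token's parent (so behind a member's value
      that is a container the superior token is the KEY until the next `,`), without them the nearest open token below (the OBJECT).
      `,` goes up by the parent link / by a backward scan. (`supAfter`, Json/Jsmn/CorrectValue.lean.) Not visible in the results.
   4. JSMN_STRICT's extra checks (no object / array / primitive directly under an object; no second value under a key; a primitive must start
      with `-`, a digit, `t`, `f`, `n`; `:` does not end a primitive) never fire on valid JSON.
-/
import Json.Jsmn.CorrectCount
import Json.Jsmn.Encode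
import Json.Jsmn.ExpectedSpans

namespace Jsmn
open Json

/-- With parent links the expected tokens are stored as they are. -/
theorem stamp_links {cfg : Config} (h : cfg.parentLinks = true) : ∀ (new old : List Token), new.length ≤ old.length → stamp cfg new old = new
  | [], _, _ => by simp [stamp]
  | e :: new, [], hl => by simp at hl
  | e :: new, o :: old, hl => by
    have ih := stamp_links h new old (by simpa using hl)
    simp only [stamp] at ih ⊢
    simp only [List.zipWith_cons_cons, ih, stampTok_parent_links h]

/-- The bytes of a stored token do not depend on what the slot held: without parent links the `parent` field is not part of the struct. -/
theorem bytes_stampTok (cfg : Config) (e old : Token) : Token.bytes cfg (stampTok cfg e old) = Token.bytes cfg e := by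
  cases h : cfg.parentLinks <;> simp [Token.bytes, stampTok, h]

theorem flatMap_bytes_stamp (cfg : Config) : ∀ (new old : List Token), new.length ≤ old.length →
    (stamp cfg new old).flatMap (Token.bytes cfg) = new.flatMap (Token.bytes cfg)
  | [], _, _ => by simp [stamp]
  | e :: new, [], hl => by simp at hl
  | e :: new, o :: old, hl => by
    have ih := flatMap_bytes_stamp cfg new old (by simpa using hl)
    simp only [stamp] at ih ⊢
    simp only [List.zipWith_cons_cons, List.flatMap_cons, ih, bytes_stampTok]

/-- **Default build** (`Config.default`), with a token array. -/
theorem run_default_valid (w1 : List UInt8) (l : Layout) (w2 : List UInt8) (hw1 : IsWs w1) (hw2 : IsWs w2) (wf : l.WellFormed)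
    (hlen : (w1 ++ l.text ++ w2).length < 2147483648) (n : Nat) (ts0 : Tokens) (h0 : ts0.length = n) (hn : n ≤ 2147483648)
    (hcount : l.count ≤ n) :
    run Config.default (w1 ++ l.text ++ w2) (some ts0) n =
      some ((l.count : Int), some (stamp Config.default (l.tokens w1.length 0 (-1)) ts0 ++ ts0.drop l.count)) := by
  rw [run, parse_layout Config.default w1 l w2 hw1 hw2 wf (fun h => by simp [Config.default] at h) hlen n ts0 h0 hn hcount]; rfl

/-- **`-DJSMN_STRICT -DJSMN_PARENT_LINKS`** (`Config.strictLinks`), with a token array. -/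
theorem run_strictLinks_valid (w1 : List UInt8) (l : Layout) (w2 : List UInt8) (hw1 : IsWs w1) (hw2 : IsWs w2) (wf : l.WellFormed)
    (hprim : l.isPrimitive = true → w2 ≠ [])
    (hlen : (w1 ++ l.text ++ w2).length < 2147483648) (n : Nat) (ts0 : Tokens) (h0 : ts0.length = n) (hn : n ≤ 2147483648)
    (hcount : l.count ≤ n) :
    run Config.strictLinks (w1 ++ l.text ++ w2) (some ts0) n = some ((l.count : Int), some (l.tokens w1.length 0 (-1) ++ ts0.drop l.count)) := by
  have := parse_layout Config.strictLinks w1 l w2 hw1 hw2 wf (fun _ => hprim) hlen n ts0 h0 hn hcount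
  rw [stamp_links rfl _ _ (by rw [Layout.tokens_length]; omega)] at this
  rw [run, this]; rfl

/-- **`-DJSMN_STRICT …` rejects a bare top-level primitive**: `42`, `true`, `null` … with nothing behind: JSMN_ERROR_PART, tokens untouched. -/
theorem run_strictLinks_bare_primitive (w1 : List UInt8) (l : Layout) (hw1 : IsWs w1) (wf : l.WellFormed) (hp : l.isPrimitive = true)
    (hlen : (w1 ++ l.text).length < 2147483648) (toks : Option Tokens) (n : Nat) :
    run Config.strictLinks (w1 ++ l.text) toks n = some (JSMN_ERROR_PART, toks) := by
  rw [run, parse_strict_bare_primitive Config.strictLinks rfl w1 l hw1 wf hp hlen toks n]; rfl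

/-- **Counting mode**, any configuration. -/
theorem run_count_valid (cfg : Config) (w1 : List UInt8) (l : Layout) (w2 : List UInt8) (hw1 : IsWs w1) (hw2 : IsWs w2) (wf : l.WellFormed)
    (hstrict : cfg.strict = true → l.isPrimitive = true → w2 ≠ []) (hlen : (w1 ++ l.text ++ w2).length < 2147483648) (n : Nat) :
    run cfg (w1 ++ l.text ++ w2) none n = some ((l.count : Int), none) := by
  rw [run, parse_layout_count cfg w1 l w2 hw1 hw2 wf hstrict hlen n]; rfl

/-- **The output of `jsmn_main`** for a successful parse of a JSON text: the count, then the expected tokens' bytes — whatever the token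
array held before, in every configuration. -/
theorem encodeResult_valid (cfg : Config) (l : Layout) (pos : Nat) (ts0 : Tokens) (hcount : l.count ≤ ts0.length) :
    encodeResult cfg (l.count : Int) (stamp cfg (l.tokens pos 0 (-1)) ts0 ++ ts0.drop l.count) =
      le32 (l.count : Int) ++ (l.tokens pos 0 (-1)).flatMap (Token.bytes cfg) := by
  have hl : (stamp cfg (l.tokens pos 0 (-1)) ts0).length = l.count := by simp [stamp, Layout.tokens_length]; omega
  have hneg : ¬ ((l.count : Int) < 0) := by omega
  simp only [encodeResult, hneg, if_false, Int.toNat_natCast]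
  rw [List.take_append_of_le_length (by omega), List.take_of_length_le (by omega),
    flatMap_bytes_stamp cfg _ _ (by rw [Layout.tokens_length]; exact hcount)]

/-- **jsmn is correct on valid JSON, said without layouts.** If `text` is a JSON text with the well-formed value `v` (`Prints`), then — in
every configuration (JSMN_STRICT: unless `v` is a number / true / false / null and `text` does not end in whitespace), for every token array
`ts0` of `n ≥ v.count` entries — jsmn_parse returns `v.count`, stops at the end of the text with `toknext = v.count`, `toksuper = -1`, and
leaves in the array tokens `E` (their `parent` fields only with JSMN_PARENT_LINKS: `stamp`), then the untouched tail of `ts0`, where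
`E` has the types, sizes and parents of `v`'s nodes in pre-order (`Value.shape`) and every token of `E` delimits a well-formed piece of
the text of its type (`Spans`). In counting mode it returns `v.count` as well. -/
theorem parse_valid_summary (cfg : Config) (v : Value) (wf : v.WellFormed) (text : List UInt8) (h : Prints v text) (hlen : text.length < 2147483648)
    (hstrict : cfg.strict = true → v.isPrimitive = true → ∃ c, text.getLast? = some c ∧ isWsChar c = true)
    (n : Nat) (ts0 : Tokens) (h0 : ts0.length = n) (hn : n ≤ 2147483648) (hcount : v.count ≤ n) :
    ∃ E : List Token, E.length = v.count ∧ E.map Token.shape = v.shape 0 (-1) ∧ (∀ t ∈ E, Spans text t) ∧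
      parse cfg text Parser.init (some ts0) n = some ((v.count : Int), ⟨text.length, v.count, -1⟩, some (stamp cfg E ts0 ++ ts0.drop v.count)) ∧
      parse cfg text Parser.init none n = some ((v.count : Int), ⟨text.length, 0, -1⟩, none) := by
  obtain ⟨w1, l, w2, hw1, hw2, hwf, rfl, rfl, hp⟩ := parse_valid cfg v wf text h hlen hstrict n ts0 h0 hn hcount
  refine ⟨l.tokens w1.length 0 (-1), by rw [Layout.tokens_length, Layout.count_value], Layout.tokens_shape l _ _ _,
    Layout.tokens_spans l hwf w1.length 0 (-1) _ w2 (by simp), hp, ?_⟩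
  rw [Layout.count_value]
  refine parse_layout_count cfg w1 l w2 hw1 hw2 hwf (fun hs hpr hw2e => ?_) hlen n
  subst hw2e
  obtain ⟨c, hc, hcw⟩ := hstrict hs (by rw [Layout.value_isPrimitive]; exact hpr)
  rw [bare_primitive_last hwf hpr hc] at hcw; exact absurd hcw (by decide)

/-- **The expected tokens depend on the text only**: two layouts of the same text (a text has several when whitespace follows a `[` or `{`
that has elements: Json/Grammar.lean) have the same number of tokens and the same tokens. (Read off from `parse_layout`: jsmn is a function
of the text.) -/
theorem tokens_unique (w1 : List UInt8) (l : Layout) (w2 : List UInt8) (w1' : List UInt8) (l' : Layout) (w2' : List UInt8)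
    (hw1 : IsWs w1) (hw2 : IsWs w2) (wf : l.WellFormed) (hw1' : IsWs w1') (hw2' : IsWs w2') (wf' : l'.WellFormed)
    (e : w1 ++ l.text ++ w2 = w1' ++ l'.text ++ w2') (hlen : (w1 ++ l.text ++ w2).length < 2147483648) :
    l.tokens w1.length 0 (-1) = l'.tokens w1'.length 0 (-1) := by
  have hc := Layout.count_le_text l wf
  have hc' := Layout.count_le_text l' wf'
  have hlen' : (w1' ++ l'.text ++ w2').length < 2147483648 := e ▸ hlen
  have hl1 : l.count ≤ (w1 ++ l.text ++ w2).length := by simp; omega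
  have hl2 : l'.count ≤ (w1 ++ l.text ++ w2).length := by rw [e]; simp; omega
  let cfg : Config := ⟨false, true⟩
  obtain ⟨n, hn⟩ : ∃ n, n = (w1 ++ l.text ++ w2).length := ⟨_, rfl⟩
  have h1 := parse_layout cfg w1 l w2 hw1 hw2 wf (fun h => by simp [cfg] at h) hlen n (List.replicate n default) (by simp) (by omega) (by omega)
  have h2 := parse_layout cfg w1' l' w2' hw1' hw2' wf' (fun h => by simp [cfg] at h) hlen' n (List.replicate n default) (by simp) (by omega) (by omega)
  rw [stamp_links rfl _ _ (by rw [Layout.tokens_length]; simp; omega)] at h1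
  rw [stamp_links rfl _ _ (by rw [Layout.tokens_length]; simp; omega)] at h2
  rw [e, h2] at h1
  simp only [Option.some.injEq, Prod.mk.injEq, Parser.mk.injEq] at h1
  have hcount : l'.count = l.count := by omega
  have := h1.2.2
  rw [hcount] at this
  exact (List.append_inj this (by rw [Layout.tokens_length, Layout.tokens_length, hcount])).1.symm

/-! ### Point 1 of the list above, evaluated: `42` and `42 ` -/

example : run Config.default [0x34, 0x32] (some [default]) 1 = some (1, some [⟨JSMN_PRIMITIVE, 0, 2, 0, 0⟩]) := by decide
example : run Config.strictLinks [0x34, 0x32] (some [default]) 1 = some (JSMN_ERROR_PART, some [default]) := by decide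
example : run Config.strictLinks [0x34, 0x32] none 0 = some (JSMN_ERROR_PART, none) := by decide
example : run Config.strictLinks [0x34, 0x32, 0x20] (some [default]) 1 = some (1, some [⟨JSMN_PRIMITIVE, 0, 2, 0, -1⟩]) := by decide
example : run Config.strictLinks [0x5b, 0x34, 0x32, 0x5d] (some [default, default]) 2 =
    some (2, some [⟨JSMN_ARRAY, 0, 4, 1, -1⟩, ⟨JSMN_PRIMITIVE, 1, 3, 0, 0⟩]) := by decide

end Jsmn
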